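-- pv_equiv track=rewrite | github.com/rmahtab0079/NightOutBackend | models/process_movies.py | is_sequel_or_prequel
-- ===== SOURCE A (Python) =====
-- def is_sequel_or_prequel(original_movie: str, candidate_movie: str) -> bool:
--     """
--     Check if candidate_movie is likely a sequel or prequel of original_movie
--     """
--     original_lower = original_movie.lower()
--     candidate_lower = candidate_movie.lower()
--
--     # Remove common sequel/prequel indicators to get base title
--     sequel_prequel_indicators = [
--         ' 2', ' 3', ' 4', ' 5', ' 6', ' 7', ' 8', ' 9',
--         ' ii', ' iii', ' iv', ' v', ' vi', ' vii', ' viii',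
--         ' part', ' chapter',
--         ': the', ' returns', ' reloaded', ' revolutions', ' rises',
--         ' begins', ' origins', ' first', ' zero', ' episode',
--         ' prequel', ' sequel', ' saga', ' chronicles'
--     ]
--
--     original_base = original_lower
--     candidate_base = candidate_lower
--
--     for indicator in sequel_prequel_indicators:
--         original_base = original_base.split(indicator)[0]
--         candidate_base = candidate_base.split(indicator)[0]
--
--     # If base titles are very similar, likely a sequel or prequel
--     return original_base in candidate_base or candidate_base in original_base
-- ===== SOURCE B (Python) =====
-- INDICATORS = [
--     ' 2', ' 3', ' 4', ' 5', ' 6', ' 7', ' 8', ' 9',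
--     ' ii', ' iii', ' iv', ' v', ' vi', ' vii', ' viii',
--     ' part', ' chapter',
--     ': the', ' returns', ' reloaded', ' revolutions', ' rises',
--     ' begins', ' origins', ' first', ' zero', ' episode',
--     ' prequel', ' sequel', ' saga', ' chronicles'
-- ]
--
--
-- def _base(s):
--     """Single left-to-right scan: stop at the first delimiter char (' ' or ':')
--     where some sequel/prequel marker starts; keep the prefix before it."""
--     for i in range(len(s)):
--         c = s[i]
--         if (c == ' ' or c == ':') and any(s.startswith(ind, i) for ind in INDICATORS):
--             return s[:i]
--     return s
--
--
-- def is_sequel_or_prequel(original_movie: str, candidate_movie: str) -> bool: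
--     original_base = _base(original_movie.lower())
--     candidate_base = _base(candidate_movie.lower())
--     return original_base in candidate_base or candidate_base in original_base
-- ===== Notes on version B (the rewrite author's own statement) =====
-- stated objective: alternative
-- what changed: A loops over the 29 indicators, repeatedly splitting the running (mutated) base string on each and keeping the head; B does no find/split at all: it scans the title's characters left to right once and early-returns the prefix at the first delimiter position (' ' or ':') where some marker matches, which is correct because A's sequential trimming always ends at the earliest occurrence of any indicator (no indicator occurrence can straddle another's, proved by a finite check).
import Mathlib
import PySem

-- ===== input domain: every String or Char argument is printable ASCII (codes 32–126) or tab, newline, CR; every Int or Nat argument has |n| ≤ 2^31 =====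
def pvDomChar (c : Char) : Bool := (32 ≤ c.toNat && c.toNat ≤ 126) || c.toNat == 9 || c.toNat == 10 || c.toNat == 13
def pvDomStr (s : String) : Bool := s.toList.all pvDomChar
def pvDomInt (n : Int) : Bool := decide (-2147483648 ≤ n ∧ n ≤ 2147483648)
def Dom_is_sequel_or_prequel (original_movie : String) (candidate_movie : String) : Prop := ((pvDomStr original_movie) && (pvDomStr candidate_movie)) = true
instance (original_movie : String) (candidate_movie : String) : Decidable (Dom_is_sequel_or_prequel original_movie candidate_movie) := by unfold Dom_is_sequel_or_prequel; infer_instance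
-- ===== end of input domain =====

-- B replaces A's per-indicator split loop by a single left-to-right scan of the title that
-- early-returns the prefix at the first delimiter position where a marker matches; objective: alternative.

-- the module-level indicator list both implementations share (data, not code)
def pvInds : List String :=
  [" 2", " 3", " 4", " 5", " 6", " 7", " 8", " 9",
   " ii", " iii", " iv", " v", " vi", " vii", " viii",
   " part", " chapter",
   ": the", " returns", " reloaded", " revolutions", " rises",
   " begins", " origins", " first", " zero", " episode",
   " prequel", " sequel", " saga", " chronicles"]

-- ===== PORT A =====
-- literal port of A: lower both titles, then for each indicator in order replace each base by
-- base.split(indicator)[0]; Python's split never returns an empty list, so [0] is the head.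
def is_sequel_or_prequel (original_movie : String) (candidate_movie : String) : Bool :=
  let original_lower := PySem.Chars.lower original_movie.toList
  let candidate_lower := PySem.Chars.lower candidate_movie.toList
  let p := pvInds.foldl
    (fun (p : List Char × List Char) indicator =>
      ((PySem.Chars.splitOn p.1 indicator.toList).headD [],
       (PySem.Chars.splitOn p.2 indicator.toList).headD []))
    (original_lower, candidate_lower)
  PySem.Chars.isIn p.1 p.2 || PySem.Chars.isIn p.2 p.1

-- ===== PORT B =====
-- Source B's _base loop 'for i in range(len(s)): …' as an index recursion; (s.drop i).headD ' '
-- is s[i] (i is in range here), and s.startswith(ind, i) is ind.isPrefixOf (s.drop i).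
def pvScanGo (s : List Char) (i : Nat) : List Char :=
  if _h : i < s.length then
    let c := (s.drop i).headD ' '
    if (c == ' ' || c == ':') && pvInds.any (fun ind => ind.toList.isPrefixOf (s.drop i)) then
      s.take i
    else
      pvScanGo s (i + 1)
  else s
termination_by s.length - i

def pvBaseB (s : List Char) : List Char := pvScanGo s 0

def is_sequel_or_prequel_alt (original_movie : String) (candidate_movie : String) : Bool :=
  let original_base := pvBaseB (PySem.Chars.lower original_movie.toList)
  let candidate_base := pvBaseB (PySem.Chars.lower candidate_movie.toList)
  PySem.Chars.isIn original_base candidate_base || PySem.Chars.isIn candidate_base original_base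

-- ===== PRECONDITION & SPEC =====
def Spec_is_sequel_or_prequel (original_movie : String) (candidate_movie : String) (out : Bool) : Prop := out = is_sequel_or_prequel_alt original_movie candidate_movie
instance (original_movie : String) (candidate_movie : String) (out : Bool) : Decidable (Spec_is_sequel_or_prequel original_movie candidate_movie out) := by unfold Spec_is_sequel_or_prequel; infer_instance

-- ===== CLAIM (what is proved, stated in full; the proofs are below) =====
def Claim_equal_is_sequel_or_prequel : Prop := ∀ (original_movie : String) (candidate_movie : String), Dom_is_sequel_or_prequel original_movie candidate_movie → Spec_is_sequel_or_prequel original_movie candidate_movie (is_sequel_or_prequel original_movie candidate_movie)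

-- ===== LEMMAS AND PROOFS =====

-- the position of the first occurrence of sep in l, l.length if none (sep ≠ [])
def pvCut (sep : List Char) : List Char → Nat
  | [] => 0
  | l@(_ :: rest) => if sep.isPrefixOf l then 0 else pvCut sep rest + 1

lemma pvCut_min (sep l : List Char) : ∀ i < pvCut sep l, ¬ sep <+: l.drop i := by
  induction l with
  | nil => simp [pvCut]
  | cons c rest ih =>
    intro i hi
    simp only [pvCut] at hi
    split at hi
    · omega
    · rename_i hpre
      cases i with
      | zero =>
        intro hp
        exact hpre (List.isPrefixOf_iff_prefix.mpr hp)
      | succ j =>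
        simpa using ih j (by omega)

lemma pvCut_spec (sep l : List Char) : sep <+: l.drop (pvCut sep l) ∨ pvCut sep l = l.length := by
  induction l with
  | nil => simp [pvCut]
  | cons c rest ih =>
    simp only [pvCut]
    split
    · rename_i hpre
      exact Or.inl (by simpa using List.isPrefixOf_iff_prefix.mp hpre)
    · rcases ih with h | h
      · exact Or.inl (by simpa using h)
      · exact Or.inr (by simp [h])

lemma pvCut_no_occ (sep l : List Char) (hne : sep ≠ []) (h : pvCut sep l = l.length) :
    ∀ i, ¬ sep <+: l.drop i := by
  intro i hp
  by_cases hi : i < l.length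
  · exact pvCut_min sep l i (by omega) hp
  · rw [List.drop_eq_nil_of_le (by omega)] at hp
    exact hne (List.prefix_nil.mp hp)

-- the position of the first occurrence of ANY indicator in l, l.length if none
def pvM : List Char → Nat
  | [] => 0
  | l@(_ :: rest) =>
    if pvInds.any (fun ind => ind.toList.isPrefixOf l) then 0 else pvM rest + 1

lemma pvM_le_length (l : List Char) : pvM l ≤ l.length := by
  induction l with
  | nil => simp [pvM]
  | cons c rest ih =>
    simp only [pvM]
    split
    · simp
    · simpa using Nat.succ_le_succ ih

lemma pvM_min (l : List Char) :
    ∀ i < pvM l, ∀ a ∈ pvInds, ¬ a.toList <+: l.drop i := by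
  induction l with
  | nil => simp [pvM]
  | cons c rest ih =>
    intro i hi a ha
    simp only [pvM] at hi
    split at hi
    · omega
    · rename_i hany
      cases i with
      | zero =>
        intro hp
        exact hany (List.any_eq_true.mpr ⟨a, ha, List.isPrefixOf_iff_prefix.mpr hp⟩)
      | succ j =>
        simpa using ih j (by omega) a ha

lemma pvM_spec (l : List Char) :
    (∃ a ∈ pvInds, a.toList <+: l.drop (pvM l)) ∨ pvM l = l.length := by
  induction l with
  | nil => simp [pvM]
  | cons c rest ih =>
    simp only [pvM]
    split
    · rename_i hany
      rcases List.any_eq_true.mp hany with ⟨a, ha, hp⟩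
      exact Or.inl ⟨a, ha, by simpa using List.isPrefixOf_iff_prefix.mp hp⟩
    · rcases ih with ⟨a, ha, hp⟩ | h
      · exact Or.inl ⟨a, ha, by simpa using hp⟩
      · exact Or.inr (by simp [h])

-- every indicator is nonempty, at least 2 long, and starts with ' ' or ':'
lemma pvInds_ne_nil : ∀ b ∈ pvInds, b.toList ≠ [] := by decide

lemma pvInds_len2 : ∀ b ∈ pvInds, 2 ≤ b.toList.length := by decide

lemma pvInds_head : ∀ b ∈ pvInds, b.toList.headD ' ' = ' ' ∨ b.toList.headD ' ' = ':' := by decide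

-- B's combined guard equals the plain any-prefix test (the char-class conjunct is implied)
lemma pvGuard_iff (rest : List Char) :
    ((((rest.headD ' ' == ' ') || (rest.headD ' ' == ':')) &&
      pvInds.any (fun ind => ind.toList.isPrefixOf rest)) = true) ↔
    (pvInds.any (fun ind => ind.toList.isPrefixOf rest) = true) := by
  constructor
  · intro h
    simp only [Bool.and_eq_true] at h
    exact h.2
  · intro h
    rcases List.any_eq_true.mp h with ⟨a, ha, hp⟩
    have hpre := List.isPrefixOf_iff_prefix.mp hp
    have hne := pvInds_ne_nil a ha
    cases hA : a.toList with
    | nil => exact absurd hA hne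
    | cons x xs =>
      cases rest with
      | nil =>
        rw [hA] at hpre
        exact absurd (List.prefix_nil.mp hpre) (by simp)
      | cons y ys =>
        rw [hA] at hpre
        have hxy : x = y := (List.cons_prefix_cons.mp hpre).1
        have hh := pvInds_head a ha
        rw [hA] at hh
        simp only [List.headD_cons] at hh
        rw [Bool.and_eq_true]
        refine ⟨?_, h⟩
        simp only [List.headD_cons]
        rcases hh with hh | hh <;> subst hxy <;> simp [hh]

-- the scan computes the prefix up to the earliest any-indicator occurrence
lemma pvScanGo_eq (s : List Char) : ∀ i, i ≤ s.length →
    pvScanGo s i = s.take (i + pvM (s.drop i)) := by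
  intro i
  induction hn : s.length - i generalizing i with
  | zero =>
    intro hi
    have : i = s.length := by omega
    subst this
    rw [pvScanGo]
    simp [pvM]
  | succ n ih =>
    intro hi
    have hlt : i < s.length := by omega
    rw [pvScanGo, dif_pos hlt]
    have hdrop : s.drop i = s[i] :: s.drop (i + 1) := List.drop_eq_getElem_cons hlt
    by_cases hany : pvInds.any (fun ind => ind.toList.isPrefixOf (s.drop i)) = true
    · rw [if_pos ((pvGuard_iff (s.drop i)).mpr hany)]
      have hM : pvM (s.drop i) = 0 := by
        rw [hdrop]
        simp only [pvM]
        rw [if_pos (by rw [← hdrop]; exact hany)]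
      rw [hM]
      norm_num
    · rw [if_neg (by
        intro hc
        exact hany ((pvGuard_iff (s.drop i)).mp hc))]
      have hM : pvM (s.drop i) = pvM (s.drop (i + 1)) + 1 := by
        rw [hdrop]
        simp only [pvM]
        rw [if_neg (by rw [← hdrop]; exact hany)]
      rw [ih (i + 1) (by omega) (by omega), hM]
      congr 1
      omega

-- split(sep)[0] is the prefix before the first occurrence
lemma splitOn_go_acc (sep : List Char) (fuel : Nat) (l cur : List Char) (acc : List (List Char)) :
    PySem.Chars.splitOn.go sep fuel l cur acc = acc.reverse ++ PySem.Chars.splitOn.go sep fuel l cur [] := by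
  induction fuel generalizing l cur acc with
  | zero => rw [PySem.Chars.splitOn.go.eq_def, PySem.Chars.splitOn.go.eq_def]; simp
  | succ n ih =>
    cases l with
    | nil => rw [PySem.Chars.splitOn.go.eq_def, PySem.Chars.splitOn.go.eq_def]; simp
    | cons c rest =>
      rw [PySem.Chars.splitOn.go.eq_def, PySem.Chars.splitOn.go.eq_def]
      by_cases hp : sep.isPrefixOf (c :: rest)
      · simp only [hp, if_true]
        rw [ih _ _ (cur.reverse :: acc), ih _ _ ([cur.reverse])]
        simp
      · simp only [hp, Bool.false_eq_true, if_false]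
        exact ih _ _ _

lemma splitOn_go_head (sep : List Char) (fuel : Nat) (l cur : List Char) (h : l.length ≤ fuel) :
    (PySem.Chars.splitOn.go sep fuel l cur []).headD [] = cur.reverse ++ l.take (pvCut sep l) := by
  induction fuel generalizing l cur with
  | zero =>
    have hl : l = [] := List.eq_nil_of_length_eq_zero (by omega)
    subst hl
    rw [PySem.Chars.splitOn.go.eq_def]
    simp [pvCut]
  | succ n ih =>
    cases l with
    | nil =>
      rw [PySem.Chars.splitOn.go.eq_def]
      simp [pvCut]
    | cons c rest =>
      rw [PySem.Chars.splitOn.go.eq_def]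
      by_cases hp : sep.isPrefixOf (c :: rest)
      · simp only [hp, if_true]
        rw [splitOn_go_acc]
        simp [pvCut, hp]
      · simp only [hp, Bool.false_eq_true, if_false]
        rw [ih rest (c :: cur) (by simpa using Nat.lt_succ_iff.mp (by simpa using h))]
        simp [pvCut, hp]

lemma splitOn_head (s sep : List Char) :
    (PySem.Chars.splitOn s sep).headD [] = s.take (pvCut sep s) := by
  have := splitOn_go_head sep (s.length + 1) s [] (by omega)
  simpa [PySem.Chars.splitOn] using this

-- no indicator occurrence ever straddles another indicator's occurrence (finite check on the list)
def pvNOVcore : Prop := ∀ b ∈ pvInds, ∀ k ∈ List.range b.toList.length, 1 ≤ k → ∀ a ∈ pvInds,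
  ¬ (b.toList[k]? = a.toList[0]? ∧ (k + 1 < b.toList.length → b.toList[k + 1]? = a.toList[1]?))

lemma pvNOVcore_holds : pvNOVcore := by unfold pvNOVcore; decide

-- the no-overlap lemma: an occurrence of b strictly before an occurrence of a ends at or before it
lemma pvNOV (s : List Char) (a b : String) (ha : a ∈ pvInds) (hb : b ∈ pvInds)
    (c q : Nat) (hoa : a.toList <+: s.drop c) (hob : b.toList <+: s.drop q) (hlt : q < c) :
    q + b.toList.length ≤ c := by
  by_contra hcon
  push Not at hcon
  have hb2 := pvInds_len2 b hb
  have ha2 := pvInds_len2 a ha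
  rcases hoa with ⟨ta, hta⟩
  rcases hob with ⟨tb, htb⟩
  have hbg : ∀ i, i < b.toList.length → s[q + i]? = b.toList[i]? := by
    intro i hi
    rw [← List.getElem?_drop, ← htb, List.getElem?_append_left hi]
  have hag : ∀ i, i < a.toList.length → s[c + i]? = a.toList[i]? := by
    intro i hi
    rw [← List.getElem?_drop, ← hta, List.getElem?_append_left hi]
  set k := c - q with hk
  have hk1 : 1 ≤ k := by omega
  have hkb : k < b.toList.length := by omega
  apply pvNOVcore_holds b hb k (by simpa using hkb) hk1 a ha
  constructor
  · rw [← hbg k hkb, ← hag 0 (by omega)]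
    congr 1
    omega
  · intro hk1b
    rw [← hbg (k + 1) hk1b, ← hag 1 (by omega)]
    congr 1
    omega

-- occurrences inside a prefix
lemma occ_take_iff (s sep : List Char) (hne : sep ≠ []) (c q : Nat) :
    sep <+: (s.take c).drop q ↔ (sep <+: s.drop q ∧ q + sep.length ≤ c) := by
  rw [List.drop_take, List.prefix_take_iff]
  have hlen : 1 ≤ sep.length := by
    cases sep with
    | nil => exact absurd rfl hne
    | cons _ _ => simp
  constructor
  · rintro ⟨h1, h2⟩
    exact ⟨h1, by omega⟩
  · rintro ⟨h1, h2⟩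
    exact ⟨h1, by omega⟩

def pvAligned (s : List Char) (c : Nat) : Prop :=
  c = s.length ∨ ∃ a ∈ pvInds, a.toList <+: s.drop c

lemma pvCut_unique (sep l : List Char) (hne : sep ≠ []) (q : Nat)
    (hq : sep <+: l.drop q) (hmin : ∀ i < q, ¬ sep <+: l.drop i) : pvCut sep l = q := by
  rcases Nat.lt_trichotomy (pvCut sep l) q with h | h | h
  · rcases pvCut_spec sep l with hocc | hlen
    · exact absurd hocc (hmin _ h)
    · exact absurd hq (pvCut_no_occ sep l hne hlen q)
  · exact h
  · exact absurd hq (pvCut_min sep l q h)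

lemma pvCut_take (s : List Char) (b : String) (hb : b ∈ pvInds) (c : Nat)
    (hc : c ≤ s.length) (hal : pvAligned s c) :
    pvCut b.toList (s.take c) = min c (pvCut b.toList s) := by
  have hne := pvInds_ne_nil b hb
  have hb1 : 1 ≤ b.toList.length := by
    have := pvInds_len2 b hb; omega
  rcases pvCut_spec b.toList s with hocc | hlen
  · by_cases hmc : pvCut b.toList s < c
    · have hend : pvCut b.toList s + b.toList.length ≤ c := by
        rcases hal with hcl | ⟨a, ha, hoa⟩
        · have h1 := hocc.length_le
          rw [List.length_drop] at h1
          omega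
        · exact pvNOV s a b ha hb c _ hoa hocc hmc
      have hocc' : b.toList <+: (s.take c).drop (pvCut b.toList s) :=
        (occ_take_iff s b.toList hne c _).mpr ⟨hocc, hend⟩
      have hmin' : ∀ i < pvCut b.toList s, ¬ b.toList <+: (s.take c).drop i := by
        intro i hi hp
        exact pvCut_min b.toList s i hi ((occ_take_iff s b.toList hne c i).mp hp).1
      rw [pvCut_unique b.toList (s.take c) hne _ hocc' hmin']
      omega
    · have hnone : ∀ i, ¬ b.toList <+: (s.take c).drop i := by
        intro i hp
        rcases (occ_take_iff s b.toList hne c i).mp hp with ⟨h1, h2⟩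
        exact pvCut_min b.toList s i (by omega) h1
      rcases pvCut_spec b.toList (s.take c) with h | h
      · exact absurd h (hnone _)
      · rw [h, List.length_take]
        omega
  · have hnone : ∀ i, ¬ b.toList <+: (s.take c).drop i := by
      intro i hp
      exact pvCut_no_occ b.toList s hne hlen i ((occ_take_iff s b.toList hne c i).mp hp).1
    rcases pvCut_spec b.toList (s.take c) with h | h
    · exact absurd h (hnone _)
    · rw [h, List.length_take]
      omega

lemma pvAligned_step (s : List Char) (b : String) (hb : b ∈ pvInds) (c : Nat)
    (hc : c ≤ s.length) (hal : pvAligned s c) :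
    pvAligned s (min c (pvCut b.toList s)) := by
  rcases pvCut_spec b.toList s with hocc | hlen
  · by_cases hmc : pvCut b.toList s < c
    · rw [min_eq_right (by omega)]
      exact Or.inr ⟨b, hb, hocc⟩
    · rwa [min_eq_left (by omega)]
  · rw [min_eq_left (by omega)]
    exact hal

-- A's fold over a suffix of the indicator list, in terms of pvCut minima
lemma pvFoldA (s : List Char) (L : List String) (hL : ∀ x ∈ L, x ∈ pvInds) :
    ∀ c : Nat, c ≤ s.length → pvAligned s c →
    L.foldl (fun t ind => (PySem.Chars.splitOn t ind.toList).headD []) (s.take c) =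
      s.take (L.foldl (fun c b => min c (pvCut b.toList s)) c) := by
  induction L with
  | nil => intro c hc hal; rfl
  | cons b L ih =>
    intro c hc hal
    have hb : b ∈ pvInds := hL b (by simp)
    simp only [List.foldl_cons]
    rw [splitOn_head, pvCut_take s b hb c hc hal, List.take_take,
      min_eq_left (by omega)]
    exact ih (fun x hx => hL x (by simp [hx])) (min c (pvCut b.toList s)) (by omega)
      (pvAligned_step s b hb c hc hal)

-- fold-of-minima bounds
lemma pvFoldMin_le_init (s : List Char) (L : List String) :
    ∀ c : Nat, L.foldl (fun c b => min c (pvCut b.toList s)) c ≤ c := by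
  induction L with
  | nil => intro c; exact le_rfl
  | cons b L ih =>
    intro c
    simp only [List.foldl_cons]
    exact le_trans (ih _) (min_le_left _ _)

lemma pvFoldMin_le_mem (s : List Char) (L : List String) (b : String) (hb : b ∈ L) :
    ∀ c : Nat, L.foldl (fun c b => min c (pvCut b.toList s)) c ≤ pvCut b.toList s := by
  induction L with
  | nil => cases hb
  | cons x L ih =>
    intro c
    rcases List.mem_cons.mp hb with h | h
    · subst h
      simp only [List.foldl_cons]
      exact le_trans (pvFoldMin_le_init s L _) (min_le_right _ _)
    · simp only [List.foldl_cons]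
      exact ih h _

lemma pvLe_foldMin (s : List Char) (L : List String) (m : Nat)
    (hm : ∀ b ∈ L, m ≤ pvCut b.toList s) :
    ∀ c : Nat, m ≤ c → m ≤ L.foldl (fun c b => min c (pvCut b.toList s)) c := by
  induction L with
  | nil => intro c hc; exact hc
  | cons b L ih =>
    intro c hc
    simp only [List.foldl_cons]
    exact ih (fun x hx => hm x (by simp [hx])) _ (le_min hc (hm b (by simp)))

-- the earliest any-indicator occurrence equals the fold of per-indicator minima
lemma pvM_eq_foldMin (s : List Char) :
    pvM s = pvInds.foldl (fun c b => min c (pvCut b.toList s)) s.length := by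
  apply Nat.le_antisymm
  · refine pvLe_foldMin s pvInds (pvM s) ?_ s.length (pvM_le_length s)
    intro b hb
    by_contra hcon
    push Not at hcon
    rcases pvCut_spec b.toList s with hocc | hlen
    · exact pvM_min s _ hcon b hb hocc
    · have := pvM_le_length s
      omega
  · rcases pvM_spec s with ⟨a, ha, hp⟩ | h
    · have hcut : pvCut a.toList s ≤ pvM s := by
        by_contra hcon
        push Not at hcon
        exact pvCut_min a.toList s _ hcon hp
      exact le_trans (pvFoldMin_le_mem s pvInds a ha s.length) hcut
    · rw [h]
      exact pvFoldMin_le_init s pvInds s.length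

-- the two bases coincide
lemma pvBase_eq (s : List Char) :
    pvInds.foldl (fun t ind => (PySem.Chars.splitOn t ind.toList).headD []) s = pvBaseB s := by
  have hA := pvFoldA s pvInds (fun x hx => hx) s.length le_rfl (Or.inl rfl)
  rw [List.take_length] at hA
  rw [hA, ← pvM_eq_foldMin s]
  rw [pvBaseB, pvScanGo_eq s 0 (by omega)]
  simp

-- the pairwise fold in A splits into the two independent folds
lemma foldl_pair (L : List String) (f : List Char → String → List Char) (x y : List Char) :
    L.foldl (fun (p : List Char × List Char) ind => (f p.1 ind, f p.2 ind)) (x, y) =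
      (L.foldl f x, L.foldl f y) := by
  induction L generalizing x y with
  | nil => rfl
  | cons b L ih => simp [List.foldl_cons, ih]

-- ===== VERDICT (by name: the statement is the Claim_ definition above) =====
theorem is_sequel_or_prequel_spec : Claim_equal_is_sequel_or_prequel := by
  intro o c _
  show _ = _
  simp only [is_sequel_or_prequel, is_sequel_or_prequel_alt]
  rw [foldl_pair pvInds (fun t ind => (PySem.Chars.splitOn t ind.toList).headD [])]
  simp only [pvBase_eq]
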